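-- pv_equiv track=rewrite | github.com/arbiter07/py-algorithm | step31-35.py | solution_35
-- ===== SOURCE A (Python) =====
-- def solution_35(n, words):
--   word_set = set()
--   pre_char = words[0][0]
--   for idx, word in enumerate(words):
--     if word[0] != pre_char or word in word_set:
--         return [( idx % n ) + 1, idx // n + 1]
--     word_set.add(word)
--     pre_char = word[-1]
--
--
--   return [0,0]
-- ===== SOURCE B (Python) =====
-- def solution_35(n, words):
--     # Two independent passes instead of A's fused loop:
--     # pass 1: earliest chain break between consecutive words
--     first_break = None
--     for i in range(1, len(words)):
--         if words[i][0] != words[i - 1][-1]: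
--             first_break = i
--             break
--     # pass 2: earliest duplicate word
--     first_dup = None
--     seen = set()
--     for i, w in enumerate(words):
--         if w in seen:
--             first_dup = i
--             break
--         seen.add(w)
--     candidates = [i for i in (first_break, first_dup) if i is not None]
--     if not candidates:
--         return [0, 0]
--     i = min(candidates)
--     return [i % n + 1, i // n + 1]
-- ===== Notes on version B (the rewrite author's own statement) =====
-- stated objective: alternative
-- what changed: Replaces A's single fused loop (running seen-set + chained pre_char with one combined failure test) by two independent passes -- pass 1 finds the earliest adjacent chain break, pass 2 the earliest duplicate -- and takes the minimum of the two failure indices.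
-- outside the precondition, e.g. on solution_35(0, ['ab', 'bc']): A returns [0, 0], B returns [0, 0]; on solution_35(2, ['ab', 'ba', 'ab', '']): A returns [1, 2], B raises IndexError
import Mathlib
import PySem

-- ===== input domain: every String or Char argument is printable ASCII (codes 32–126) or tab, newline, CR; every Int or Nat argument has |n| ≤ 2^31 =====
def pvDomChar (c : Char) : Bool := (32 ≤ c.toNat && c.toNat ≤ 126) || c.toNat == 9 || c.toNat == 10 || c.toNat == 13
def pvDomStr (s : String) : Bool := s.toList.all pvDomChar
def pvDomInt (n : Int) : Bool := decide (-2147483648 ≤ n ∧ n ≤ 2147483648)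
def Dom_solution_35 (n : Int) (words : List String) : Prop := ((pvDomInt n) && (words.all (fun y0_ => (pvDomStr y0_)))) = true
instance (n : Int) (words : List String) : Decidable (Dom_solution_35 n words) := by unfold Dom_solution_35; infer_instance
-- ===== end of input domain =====

-- B replaces A's fused loop by two independent passes (earliest chain break, earliest duplicate) combined by min: an alternative decomposition, same cost.


-- ===== PORT A =====
-- A's for-loop over enumerate(words): state = (word_set, pre_char, idx); pre_char is Option Char (none = the Python access raised, outside Pre_)
def solution35Loop (n : Int) : List String → PySem.Set String → Option Char → Int → List Int
  | [], _, _, _ => [0, 0]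
  | word :: rest, wordSet, preChar, idx =>
    if (PySem.Str.pyGet? word 0 != preChar) || PySem.Set.contains wordSet word then
      [PySem.Int.mod idx n + 1, PySem.Int.floordiv idx n + 1]
    else
      solution35Loop n rest (PySem.Set.add wordSet word) (PySem.Str.pyGet? word (-1)) (idx + 1)

def solution_35 (n : Int) (words : List String) : List Int :=
  let preChar : Option Char :=
    match PySem.List.pyGet? words 0 with
    | some w => PySem.Str.pyGet? w 0      -- words[0][0]
    | none => none                         -- Python raises IndexError here (words = []), excluded by Pre_
  solution35Loop n words PySem.Set.empty preChar 0

-- ===== PORT B =====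
-- pass 1 of Source B: for i in range(1, len(words)): first i with words[i][0] != words[i-1][-1]
def altFirstBreak : String → List String → Int → Option Int
  | prev, w :: rest, i =>
    if PySem.Str.pyGet? w 0 != PySem.Str.pyGet? prev (-1) then some i
    else altFirstBreak w rest (i + 1)
  | _, [], _ => none

-- pass 2 of Source B: first i with words[i] already seen
def altFirstDup : List String → PySem.Set String → Int → Option Int
  | [], _, _ => none
  | w :: rest, seen, i =>
    if PySem.Set.contains seen w then some i
    else altFirstDup rest (PySem.Set.add seen w) (i + 1)

-- candidates / min / result of Source B
def altResult (n : Int) (fb fd : Option Int) : List Int :=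
  match fb, fd with
  | none, none => [0, 0]
  | some i, none => [PySem.Int.mod i n + 1, PySem.Int.floordiv i n + 1]
  | none, some j => [PySem.Int.mod j n + 1, PySem.Int.floordiv j n + 1]
  | some i, some j => [PySem.Int.mod (min i j) n + 1, PySem.Int.floordiv (min i j) n + 1]

def solution_35_alt (n : Int) (words : List String) : List Int :=
  let fb : Option Int :=
    match words with
    | w0 :: rest => altFirstBreak w0 rest 1
    | [] => none
  let fd : Option Int := altFirstDup words PySem.Set.empty 0
  altResult n fb fd

-- ===== PRECONDITION & SPEC =====
-- Pre_ excludes exactly the inputs where Python A can raise: n = 0 (ZeroDivisionError on failure), empty words list and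
-- empty-string words (IndexError on word[0]/word[-1]); it is coarser than A's raise set (A returns [0,0] for n = 0 with an
-- unbroken chain, and never reaches an empty word after the failure index) — see claim.json cites.
def Pre_solution_35 (n : Int) (words : List String) : Prop :=
  n ≠ 0 ∧ words ≠ [] ∧ ∀ w ∈ words, w ≠ ""
instance (n : Int) (words : List String) : Decidable (Pre_solution_35 n words) := by unfold Pre_solution_35; infer_instance
def pvWitness_solution_35 : Int × List String := (2, ["ab", "ba", "ab"])

def Spec_solution_35 (n : Int) (words : List String) (out : List Int) : Prop := out = solution_35_alt n words
instance (n : Int) (words : List String) (out : List Int) : Decidable (Spec_solution_35 n words out) := by unfold Spec_solution_35; infer_instance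

-- ===== CLAIM (what is proved, stated in full; the proofs are below) =====
def Claim_equal_solution_35 : Prop := ∀ (n : Int) (words : List String), Dom_solution_35 n words → Pre_solution_35 n words → Spec_solution_35 n words (solution_35 n words)

-- ===== LEMMAS AND PROOFS =====

theorem altFirstBreak_ge (ws : List String) : ∀ (prev : String) (i j : Int),
    altFirstBreak prev ws i = some j → i ≤ j := by
  induction ws with
  | nil => intro prev i j h; simp [altFirstBreak] at h
  | cons w rest ih =>
    intro prev i j h
    unfold altFirstBreak at h
    split at h
    · simp at h; omega
    · have := ih w (i + 1) j h; omega

theorem altFirstDup_ge (ws : List String) : ∀ (seen : PySem.Set String) (i j : Int),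
    altFirstDup ws seen i = some j → i ≤ j := by
  induction ws with
  | nil => intro seen i j h; simp [altFirstDup] at h
  | cons w rest ih =>
    intro seen i j h
    unfold altFirstDup at h
    split at h
    · simp at h; omega
    · have := ih (PySem.Set.add seen w) (i + 1) j h; omega

-- loop invariant: A's fused loop equals the min-combination of B's two passes
theorem loop_eq_combine (n : Int) (ws : List String) : ∀ (prev : String) (seen : PySem.Set String) (i : Int),
    solution35Loop n ws seen (PySem.Str.pyGet? prev (-1)) i =
      altResult n (altFirstBreak prev ws i) (altFirstDup ws seen i) := by
  induction ws with
  | nil => intro prev seen i; simp [solution35Loop, altFirstBreak, altFirstDup, altResult]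
  | cons w rest ih =>
    intro prev seen i
    unfold solution35Loop altFirstBreak altFirstDup
    by_cases hb : (PySem.Str.pyGet? w 0 != PySem.Str.pyGet? prev (-1)) = true
    · by_cases hd : PySem.Set.contains seen w = true
      · simp only [hb, hd, Bool.true_or, if_true]
        simp [altResult]
      · simp only [Bool.not_eq_true] at hd
        simp only [hb, hd, Bool.true_or, if_true]
        cases hfd : altFirstDup rest (PySem.Set.add seen w) (i + 1) with
        | none => simp [altResult]
        | some j =>
          have hj := altFirstDup_ge rest _ _ _ hfd
          have : min i j = i := by omega
          simp [altResult, this]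
    · simp only [Bool.not_eq_true] at hb
      by_cases hd : PySem.Set.contains seen w = true
      · simp only [hb, hd, Bool.false_or, if_true]
        cases hfb : altFirstBreak w rest (i + 1) with
        | none => simp [altResult]
        | some j =>
          have hj := altFirstBreak_ge rest _ _ _ hfb
          have : min j i = i := by omega
          simp [altResult, this]
      · simp only [Bool.not_eq_true] at hd
        simp only [hb, hd, Bool.false_or]
        exact ih w (PySem.Set.add seen w) (i + 1)

theorem solution_35_eq (n : Int) (words : List String) :
    solution_35 n words = solution_35_alt n words := by
  cases words with
  | nil => rfl
  | cons w0 rest =>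
    unfold solution_35 solution_35_alt
    simp only [PySem.List.pyGet?_zero_cons]
    unfold solution35Loop altFirstDup
    simp only [bne_self_eq_false, Bool.false_or]
    have hc : PySem.Set.contains PySem.Set.empty w0 = false := rfl
    simp only [hc]
    exact loop_eq_combine n rest w0 (PySem.Set.add PySem.Set.empty w0) 1

-- ===== VERDICT (by name: the statement is the Claim_ definition above) =====
theorem solution_35_spec : Claim_equal_solution_35 := by
  intro n words _ _
  exact solution_35_eq n words
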